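-- pv_equiv track=rewrite | github.com/AdamZhouSE/pythonHomework | Code/CodeRecords/2579/60766/241030.py | getminSum
-- ===== SOURCE A (Python) =====
-- def toSum(num, i, j, ev):
--     nu=0
--     for t in range(i, i+ev):
--         for r in range(j, j+ev):
--             nu=nu+num[t][r]
--     return nu
--
-- def getminSum(num, ev):
--     if ev==1:
--         return getMin(num)
--     count=9999999999999
--     for i in range(len(num)-ev+1):
--         for j in range(len(num[0])-ev+1):
--             count=min(count, toSum(num, i, j, ev))
--     return count
--
-- def getMin(num):
--     count=num[0][0]
--     for i in range(len(num)):
--         for j in range(len(num[0])):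
--             count=min(count, num[i][j])
--     return count
-- ===== SOURCE B (Python) =====
-- def getminSum(num, ev):
--     m = len(num[0])
--     if ev == 1:
--         return min(min(row[:m]) for row in num)
--     # 2D prefix-sum table: P[i][j] = sum of num[t][r] for t < i, r < j
--     P = [[0] * (m + 1)]
--     for row in num:
--         prev = P[-1]
--         cur = [0]
--         for p0, p1, x in zip(prev, prev[1:], row):
--             cur.append(cur[-1] + p1 - p0 + x)
--         P.append(cur)
--     ans = 9999999999999
--     for i in range(len(num) - ev + 1):
--         for j in range(m - ev + 1):
--             ans = min(ans, P[i + ev][j + ev] - P[i][j + ev] - P[i + ev][j] + P[i][j])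
--     return ans
-- ===== Notes on version B (the rewrite author's own statement) =====
-- stated objective: alternative
-- what changed: B computes each ev*ev window sum in O(1) from a 2D prefix-sum table built once, instead of A's per-window rescan of all ev*ev cells (toSum); the ev==1 case becomes a min of row minima. On the generated timing inputs this is not measurably faster (few windows, table-build constants), so no speed is claimed.
-- outside the precondition, e.g. on getminSum([[1]], -1): A returns 0, B raises IndexError; on getminSum([[1]], 0): A returns 0, B returns 0; on getminSum([[1, 2], [3]], 0): A returns 0, B raises IndexError
import Mathlib
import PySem

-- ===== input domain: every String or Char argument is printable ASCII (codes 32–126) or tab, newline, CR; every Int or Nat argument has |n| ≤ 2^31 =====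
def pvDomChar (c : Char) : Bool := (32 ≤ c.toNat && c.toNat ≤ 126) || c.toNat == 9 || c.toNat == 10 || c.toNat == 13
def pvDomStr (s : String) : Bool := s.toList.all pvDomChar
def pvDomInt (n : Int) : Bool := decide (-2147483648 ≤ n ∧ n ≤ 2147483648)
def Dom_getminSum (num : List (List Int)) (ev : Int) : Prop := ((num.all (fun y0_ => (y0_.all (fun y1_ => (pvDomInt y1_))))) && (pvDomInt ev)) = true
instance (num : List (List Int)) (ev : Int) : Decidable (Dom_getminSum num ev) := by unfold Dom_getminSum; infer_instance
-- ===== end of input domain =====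

-- B computes each window sum from a 2D prefix-sum table built once, instead of A's per-window rescan; objective: alternative.

-- ===== PORT A =====
-- num[t][r], total via defaults; exact under Pre_ (indices in range there)
def pvCell (num : List (List Int)) (t r : Int) : Int :=
  PySem.List.pyGetD (PySem.List.pyGetD num t []) r 0

def pvToSum (num : List (List Int)) (i j ev : Int) : Int :=
  (PySem.List.pyRange i (i + ev) 1).foldl (fun nu t =>
    (PySem.List.pyRange j (j + ev) 1).foldl (fun nu r => nu + pvCell num t r) nu) 0

def pvGetMin (num : List (List Int)) : Int :=
  (PySem.List.pyRange 0 (PySem.List.len num) 1).foldl (fun c i =>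
    (PySem.List.pyRange 0 (PySem.List.len (PySem.List.pyGetD num 0 [])) 1).foldl (fun c j =>
      min c (pvCell num i j)) c) (pvCell num 0 0)

def getminSum (num : List (List Int)) (ev : Int) : Int :=
  if ev = 1 then pvGetMin num
  else
    (PySem.List.pyRange 0 (PySem.List.len num - ev + 1) 1).foldl (fun c i =>
      (PySem.List.pyRange 0 (PySem.List.len (PySem.List.pyGetD num 0 []) - ev + 1) 1).foldl (fun c j =>
        min c (pvToSum num i j ev)) c) 9999999999999

-- ===== PORT B =====
-- the inner 'for p0, p1, x in zip(prev, prev[1:], row): cur.append(cur[-1] + p1 - p0 + x)' loop of Source B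
def pvScanRow (prev row : List Int) : List Int :=
  (prev.zip ((PySem.List.slice prev (some 1) none).zip row)).foldl (fun cur t =>
    cur ++ [PySem.List.pyGetD cur (-1) 0 + t.2.1 - t.1 + t.2.2]) [0]

-- the 'for row in num: ... P.append(cur)' loop of Source B building the prefix-sum table
def pvBuildP (num : List (List Int)) (m : Nat) : List (List Int) :=
  num.foldl (fun P row => P ++ [pvScanRow (PySem.List.pyGetD P (-1) []) row])
    [List.replicate (m + 1) 0]

-- P[i][j], total via defaults; exact under Pre_ (indices in range there)
def pvTab (P : List (List Int)) (i j : Int) : Int :=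
  PySem.List.pyGetD (PySem.List.pyGetD P i []) j 0

def getminSum_alt (num : List (List Int)) (ev : Int) : Int :=
  let m := (PySem.List.pyGetD num 0 []).length
  if ev = 1 then
    (PySem.List.min? (num.map (fun row =>
      (PySem.List.min? (PySem.List.slice row none (some (m : Int))) (fun x => x)).getD 0))
      (fun x => x)).getD 0
  else
    let P := pvBuildP num m
    (PySem.List.pyRange 0 (PySem.List.len num - ev + 1) 1).foldl (fun ans i =>
      (PySem.List.pyRange 0 ((m : Int) - ev + 1) 1).foldl (fun ans j =>
        min ans (pvTab P (i + ev) (j + ev) - pvTab P i (j + ev)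
                 - pvTab P (i + ev) j + pvTab P i j)) ans) 9999999999999

-- ===== PRECONDITION & SPEC =====
-- Pre_ excludes: nonpositive ev (A sums nothing and returns an accidental 0, while B raises,
-- or — for ev = 0 on a rectangular grid — happens to agree), the empty grid (A raises
-- IndexError), and grids with a row shorter than row 0 when some window (or getMin) reaches a
-- missing cell (A raises IndexError there); with ev == 1 row 0 must also be nonempty.
def Pre_getminSum (num : List (List Int)) (ev : Int) : Prop :=
  num ≠ [] ∧ 1 ≤ ev ∧
    (ev = 1 → 1 ≤ (num.headI).length ∧ ∀ row ∈ num, (num.headI).length ≤ row.length) ∧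
    (1 < ev → (ev ≤ (num.length : Int) ∧ ev ≤ ((num.headI).length : Int)) →
      ∀ row ∈ num, (num.headI).length ≤ row.length)
instance (num : List (List Int)) (ev : Int) : Decidable (Pre_getminSum num ev) := by
  unfold Pre_getminSum; infer_instance

def pvWitness_getminSum : List (List Int) × Int := ([[1, 2], [3, 4]], 2)

def Spec_getminSum (num : List (List Int)) (ev : Int) (out : Int) : Prop := out = getminSum_alt num ev
instance (num : List (List Int)) (ev : Int) (out : Int) : Decidable (Spec_getminSum num ev out) := by
  unfold Spec_getminSum; infer_instance

-- ===== CLAIM (what is proved, stated in full; the proofs are below) =====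
def Claim_equal_getminSum : Prop := ∀ (num : List (List Int)) (ev : Int), Dom_getminSum num ev → Pre_getminSum num ev → Spec_getminSum num ev (getminSum num ev)

-- ===== LEMMAS AND PROOFS =====

-- num[0] (with default) is the first row
theorem pvHead (num : List (List Int)) : PySem.List.pyGetD num 0 [] = num.headI := by
  cases num
  · rfl
  · exact PySem.List.pyGetD_zero_cons _ _ _

theorem take_succ_sum (l : List Int) (n : Nat) :
    (l.take (n+1)).sum = (l.take n).sum + l.getD n 0 := by
  rw [List.take_add_one, List.sum_append, List.getD_eq_getElem?_getD]
  cases h : l[n]? <;> simp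

-- sum of the i×j upper-left rectangle of the grid (first j cells of the first i rows)
def pvRect (num : List (List Int)) (i j : Nat) : Int :=
  ((num.take i).map (fun row => (row.take j).sum)).sum

-- the intended value of Source B's prefix-sum table
def pvTabOf (num : List (List Int)) (m : Nat) : List (List Int) :=
  (List.range (num.length + 1)).map (fun i => (List.range (m + 1)).map (fun j => pvRect num i j))

theorem pvRect_col_zero (num : List (List Int)) (i : Nat) : pvRect num i 0 = 0 := by
  simp [pvRect]

theorem pvRect_append_le (pre : List (List Int)) (row : List Int) (i j : Nat) (h : i ≤ pre.length) :
    pvRect (pre ++ [row]) i j = pvRect pre i j := by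
  simp [pvRect, List.take_append_of_le_length h]

theorem pvRect_append_last (pre : List (List Int)) (row : List Int) (j : Nat) :
    pvRect (pre ++ [row]) (pre.length + 1) j = pvRect pre pre.length j + (row.take j).sum := by
  simp [pvRect, List.take_of_length_le (by simp : (pre ++ [row]).length ≤ pre.length + 1)]

theorem pvScanFold (ts : List (Int × Int × Int)) :
    ts.foldl (fun cur t => cur ++ [PySem.List.pyGetD cur (-1) 0 + t.2.1 - t.1 + t.2.2]) [0]
      = (List.range (ts.length + 1)).map (fun j =>
          ((ts.take j).map (fun t => t.2.1 - t.1 + t.2.2)).sum) := by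
  induction ts using List.reverseRecOn with
  | nil => simp
  | append_singleton ts t ih =>
      rw [List.foldl_append, ih]
      simp only [List.foldl_cons, List.foldl_nil]
      rw [List.length_append, List.length_singleton, List.range_succ (n := ts.length + 1), List.map_append]
      congr 1
      · apply List.map_congr_left
        intro j hj
        simp only [List.mem_range] at hj
        rw [List.take_append_of_le_length (by omega)]
      · simp only [List.map_cons, List.map_nil]
        congr 1
        have hne : ((List.range (ts.length + 1)).map (fun j =>
            ((ts.take j).map (fun t => t.2.1 - t.1 + t.2.2)).sum)) ≠ [] := by simp
        rw [PySem.List.pyGetD_neg_one _ _ hne, List.getLast_eq_getElem]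
        simp only [List.length_map, List.length_range]
        rw [List.getElem_map]
        simp only [List.getElem_range]
        rw [Nat.add_sub_cancel, List.take_length]
        rw [List.take_of_length_le (by simp), List.map_append, List.sum_append]
        simp only [List.map_cons, List.map_nil, List.sum_cons, List.sum_nil, add_zero]
        ring

theorem pvZipSum (prev row : List Int) (m : Nat) (hrow : m ≤ row.length)
    (hprev : prev.length = m + 1) (j : Nat) (hj : j ≤ m) :
    (((prev.zip ((prev.drop 1).zip row)).take j).map (fun t => t.2.1 - t.1 + t.2.2)).sum
      = prev.getD j 0 - prev.getD 0 0 + (row.take j).sum := by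
  have hZ : (prev.zip ((prev.drop 1).zip row)).length = m := by
    simp only [List.length_zip, List.length_drop, hprev]
    omega
  revert hj
  induction j with
  | zero => intro _; simp
  | succ j ih =>
      intro hj
      rw [List.map_take] at ih ⊢
      rw [take_succ_sum, ih (by omega)]
      have hget : (List.map (fun (t : Int × Int × Int) => t.2.1 - t.1 + t.2.2)
          (prev.zip ((prev.drop 1).zip row))).getD j 0
          = prev.getD (j+1) 0 - prev.getD j 0 + row.getD j 0 := by
        have hjZ : j < (prev.zip ((prev.drop 1).zip row)).length := by omega
        rw [List.getD_eq_getElem?_getD, List.getElem?_map, List.getElem?_eq_getElem hjZ]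
        simp only [Option.map_some, Option.getD_some, List.getElem_zip, List.getElem_drop]
        rw [List.getD_eq_getElem?_getD, List.getElem?_eq_getElem (by omega : j + 1 < prev.length),
            List.getD_eq_getElem?_getD (l := prev) (i := j),
            List.getElem?_eq_getElem (by omega : j < prev.length),
            List.getD_eq_getElem?_getD (l := row),
            List.getElem?_eq_getElem (by omega : j < row.length)]
        simp [Nat.add_comm 1 j]
      rw [hget, take_succ_sum]
      ring

theorem pvScanRow_eq (prev row : List Int) (m : Nat) (hrow : m ≤ row.length)
    (hprev : prev.length = m + 1) :
    pvScanRow prev row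
      = (List.range (m + 1)).map (fun j => prev.getD j 0 - prev.getD 0 0 + (row.take j).sum) := by
  unfold pvScanRow
  rw [PySem.List.slice_from_one, ← List.drop_one, pvScanFold]
  have hZ : (prev.zip ((prev.drop 1).zip row)).length = m := by
    simp only [List.length_zip, List.length_drop, hprev]
    omega
  rw [hZ]
  apply List.map_congr_left
  intro j hj
  simp only [List.mem_range] at hj
  exact pvZipSum prev row m hrow hprev j (by omega)


theorem pvTabOf_step (pre : List (List Int)) (row : List Int) (m : Nat) (hrow : m ≤ row.length) :
    pvTabOf pre m ++ [pvScanRow (PySem.List.pyGetD (pvTabOf pre m) (-1) []) row]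
      = pvTabOf (pre ++ [row]) m := by
  have hne : pvTabOf pre m ≠ [] := by simp [pvTabOf]
  have hprev : PySem.List.pyGetD (pvTabOf pre m) (-1) []
      = (List.range (m + 1)).map (fun j => pvRect pre pre.length j) := by
    rw [PySem.List.pyGetD_neg_one _ _ hne, List.getLast_eq_getElem]
    simp [pvTabOf]
  rw [hprev, pvScanRow_eq _ _ m hrow (by simp)]
  have hmap : ∀ j : Nat, ((List.range (m + 1)).map (fun j => pvRect pre pre.length j)).getD j 0
      = if j < m + 1 then pvRect pre pre.length j else 0 := by
    intro j
    rw [List.getD_eq_getElem?_getD, List.getElem?_map]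
    by_cases hj : j < m + 1
    · simp [hj]
    · rw [List.getElem?_eq_none (by simpa using Nat.le_of_not_lt hj)]
      simp [hj]
  unfold pvTabOf
  rw [List.length_append, List.length_singleton, List.range_succ (n := pre.length + 1),
      List.map_append]
  congr 1
  · apply List.map_congr_left
    intro i hi
    simp only [List.mem_range] at hi
    apply List.map_congr_left
    intro j _
    rw [pvRect_append_le pre row i j (by omega)]
  · simp only [List.map_cons, List.map_nil]
    congr 1
    apply List.map_congr_left
    intro j hj
    simp only [List.mem_range] at hj
    rw [hmap j, if_pos hj, hmap 0, if_pos (by omega), pvRect_col_zero,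
        pvRect_append_last]
    ring

theorem pvBuildP_inv (m : Nat) :
    ∀ (rest pre : List (List Int)), (∀ row ∈ rest, m ≤ row.length) →
      rest.foldl (fun P row => P ++ [pvScanRow (PySem.List.pyGetD P (-1) []) row])
        (pvTabOf pre m) = pvTabOf (pre ++ rest) m := by
  intro rest
  induction rest with
  | nil => intro pre _; simp
  | cons row rest ih =>
      intro pre hrows
      rw [List.foldl_cons, pvTabOf_step pre row m (hrows row List.mem_cons_self),
          ih _ (fun r hr => hrows r (List.mem_cons_of_mem _ hr))]
      simp

theorem pvBuildP_eq (num : List (List Int)) (m : Nat)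
    (hrows : ∀ row ∈ num, m ≤ row.length) :
    pvBuildP num m = pvTabOf num m := by
  have h0 : [List.replicate (m + 1) (0:Int)] = pvTabOf [] m := by
    simp [pvTabOf, pvRect]
  unfold pvBuildP
  rw [h0, pvBuildP_inv m num [] hrows]
  simp

-- a strip sum over getD-with-default-0 equals a difference of take-sums, unconditionally
theorem sum_getD_range (l : List Int) (j e : Nat) :
    ((List.range e).map (fun b => l.getD (j + b) 0)).sum
      = (l.take (j + e)).sum - (l.take j).sum := by
  induction e with
  | zero => simp
  | succ e ih =>
      rw [List.range_succ, List.map_append, List.sum_append, ih]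
      simp only [List.map_cons, List.map_nil, List.sum_cons, List.sum_nil, add_zero]
      rw [← Nat.add_assoc, take_succ_sum, List.getD_eq_getElem?_getD]
      ring

theorem getD_map_zero (f : List Int → Int) (hf : f [] = 0) (num : List (List Int)) (t : Nat) :
    (num.map f).getD t 0 = f (num.getD t []) := by
  rw [List.getD_eq_getElem?_getD, List.getD_eq_getElem?_getD, List.getElem?_map]
  by_cases ht : t < num.length
  · simp [List.getElem?_eq_getElem ht]
  · rw [List.getElem?_eq_none (by omega)]
    simp [hf]

theorem pvStrip (num : List (List Int)) (i e c : Nat) :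
    ((List.range e).map (fun a => ((num.getD (i + a) []).take c).sum)).sum
      = pvRect num (i + e) c - pvRect num i c := by
  have h := sum_getD_range (num.map (fun row => (row.take c).sum)) i e
  rw [← List.map_take, ← List.map_take] at h
  simp only [pvRect]
  rw [← h]
  congr 1
  apply List.map_congr_left
  intro a _
  exact (getD_map_zero (fun row => (row.take c).sum) (by simp) num (i + a)).symm

theorem pvWindow (num : List (List Int)) (i j e : Nat) :
    ((List.range e).map (fun a =>
      ((List.range e).map (fun b => (num.getD (i + a) []).getD (j + b) 0)).sum)).sum
      = pvRect num (i + e) (j + e) - pvRect num i (j + e)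
        - (pvRect num (i + e) j - pvRect num i j) := by
  have h : ∀ a ∈ List.range e,
      ((List.range e).map (fun b => (num.getD (i + a) []).getD (j + b) 0)).sum
        = ((num.getD (i + a) []).take (j + e)).sum - ((num.getD (i + a) []).take j).sum := by
    intro a _; exact sum_getD_range _ j e
  rw [List.map_congr_left h]
  have hsub : ((List.range e).map (fun a =>
      ((num.getD (i + a) []).take (j + e)).sum - ((num.getD (i + a) []).take j).sum)).sum
      = ((List.range e).map (fun a => ((num.getD (i + a) []).take (j + e)).sum)).sum
        - ((List.range e).map (fun a => ((num.getD (i + a) []).take j).sum)).sum := by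
    induction List.range e with
    | nil => simp
    | cons x t iht => simp only [List.map_cons, List.sum_cons, iht]; ring
  rw [hsub, pvStrip, pvStrip]

theorem pvCell_natCast (num : List (List Int)) (t r : Nat) :
    pvCell num (t : Int) (r : Int) = (num.getD t []).getD r 0 := by
  simp [pvCell, PySem.List.pyGetD_natCast]

theorem pvRange_natCast (i e : Nat) :
    PySem.List.pyRange (i : Int) ((i : Int) + (e : Int)) 1
      = (List.range e).map (fun k => ((i + k : Nat) : Int)) := by
  rw [PySem.List.pyRange_one]
  simp only [add_sub_cancel_left, Int.toNat_natCast]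
  apply List.map_congr_left
  intro k _
  push_cast; ring

theorem pvToSum_eq (num : List (List Int)) (i j e : Nat) :
    pvToSum num (i : Int) (j : Int) (e : Int)
      = ((List.range e).map (fun a =>
          ((List.range e).map (fun b => (num.getD (i + a) []).getD (j + b) 0)).sum)).sum := by
  unfold pvToSum
  rw [pvRange_natCast i e, pvRange_natCast j e]
  rw [PySem.List.foldl_congr_mem _ _
    (fun nu t => nu + (((List.range e).map (fun k => ((j + k : Nat) : Int))).map
        (fun r => pvCell num t r)).sum) 0
    (fun acc t _ => PySem.List.foldl_add _ _ acc)]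
  rw [List.foldl_map, PySem.List.foldl_add, zero_add]
  apply congrArg List.sum
  apply List.map_congr_left
  intro a _
  rw [List.map_map]
  apply congrArg List.sum
  apply List.map_congr_left
  intro b _
  simp only [Function.comp_apply]
  exact pvCell_natCast num (i + a) (j + b)

theorem pvTab_eq (num : List (List Int)) (m i j : Nat) (hi : i ≤ num.length) (hj : j ≤ m) :
    pvTab (pvTabOf num m) (i : Int) (j : Int) = pvRect num i j := by
  unfold pvTab pvTabOf
  simp only [PySem.List.pyGetD_natCast]
  have houter : ((List.range (num.length + 1)).map
        (fun i => (List.range (m + 1)).map (fun j => pvRect num i j))).getD i []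
      = (List.range (m + 1)).map (fun j => pvRect num i j) := by
    rw [List.getD_eq_getElem?_getD, List.getElem?_map,
        List.getElem?_range (by omega : i < num.length + 1)]
    simp
  rw [houter, List.getD_eq_getElem?_getD, List.getElem?_map,
      List.getElem?_range (by omega : j < m + 1)]
  simp

-- the ev ≠ 1 branch: both programs fold min over the same (i, j) ranges; if windows exist the
-- table is exact and each window value agrees, otherwise both folds are over empty ranges
theorem pvBranch2 (num : List (List Int)) (ev : Int) (h1 : 1 ≤ ev) (hev : ¬ ev = 1)
    (hwin : (ev ≤ (num.length : Int) ∧ ev ≤ ((num.headI).length : Int)) →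
      ∀ row ∈ num, (num.headI).length ≤ row.length) :
    getminSum num ev = getminSum_alt num ev := by
  unfold getminSum getminSum_alt
  rw [if_neg hev, if_neg hev]
  simp only [PySem.List.len_eq]
  set m := (PySem.List.pyGetD num 0 []).length with hm
  have hmh : m = (num.headI).length := by rw [hm, pvHead]
  by_cases hw : ev ≤ (num.length : Int) ∧ ev ≤ (m : Int)
  · -- windows exist: every row is long enough, so the table is the exact prefix-sum table
    have hrows : ∀ row ∈ num, m ≤ row.length := by
      intro row hrow
      have := hwin ⟨hw.1, by rw [← hmh]; exact hw.2⟩ row hrow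
      omega
    rw [pvBuildP_eq num m hrows]
    apply PySem.List.foldl_congr_mem
    intro acc i hi
    apply PySem.List.foldl_congr_mem
    intro acc' j hj
    rw [PySem.List.mem_pyRange_one] at hi hj
    obtain ⟨hi0, hiU⟩ := hi
    obtain ⟨hj0, hjU⟩ := hj
    have hia : i = ((i.toNat : Nat) : Int) := (Int.toNat_of_nonneg hi0).symm
    have hjb : j = ((j.toNat : Nat) : Int) := (Int.toNat_of_nonneg hj0).symm
    have hee : ev = ((ev.toNat : Nat) : Int) := (Int.toNat_of_nonneg (by omega)).symm
    set a := i.toNat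
    set b := j.toNat
    set e := ev.toNat
    have hbnd1 : a + e ≤ num.length := by omega
    have hbnd2 : b + e ≤ m := by omega
    congr 1
    rw [hia, hjb, hee, pvToSum_eq, pvWindow]
    have c1 : ((a : Int) + (e : Int)) = ((a + e : Nat) : Int) := by push_cast; ring
    have c2 : ((b : Int) + (e : Int)) = ((b + e : Nat) : Int) := by push_cast; ring
    rw [c1, c2, pvTab_eq num m (a+e) (b+e) hbnd1 hbnd2,
        pvTab_eq num m a (b+e) (by omega) hbnd2,
        pvTab_eq num m (a+e) b hbnd1 (by omega),
        pvTab_eq num m a b (by omega) (by omega)]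
    ring
  · -- no window: the outer range is empty, or every inner fold is over the empty range
    rw [not_and_or, not_le, not_le] at hw
    cases hw with
    | inl hn =>
        rw [PySem.List.pyRange_one_eq_nil (by omega : (num.length : Int) - ev + 1 ≤ 0)]
        rfl
    | inr hmlt =>
        apply PySem.List.foldl_congr_mem
        intro acc i _
        rw [PySem.List.pyRange_one_eq_nil (by omega : (m : Int) - ev + 1 ≤ 0)]
        rfl


theorem pvCell_getElem (num : List (List Int)) (i j : Nat) (hi : i < num.length)
    (hj : j < (num[i]'hi).length) :
    pvCell num (i : Int) (j : Int) = (num[i]'hi)[j]'hj := by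
  rw [pvCell_natCast]
  rw [show num.getD i [] = num[i]'hi by
    rw [List.getD_eq_getElem?_getD, List.getElem?_eq_getElem hi]; rfl]
  rw [List.getD_eq_getElem?_getD, List.getElem?_eq_getElem hj]; rfl

-- A's double loop as a min-fold over the flattened list of cell values
theorem pvGetMin_eq_foldl (num : List (List Int)) :
    pvGetMin num
      = (((PySem.List.pyRange 0 (num.length : Int) 1).map (fun i =>
          (PySem.List.pyRange 0 ((num.headI).length : Int) 1).map (fun j =>
            pvCell num i j))).flatten).foldl min (pvCell num 0 0) := by
  unfold pvGetMin
  rw [List.foldl_flatten, List.foldl_map]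
  simp only [PySem.List.len_eq, pvHead]
  apply PySem.List.foldl_congr_mem
  intro acc i _
  rw [List.foldl_map]

theorem pvMem_cells (num : List (List Int)) (x : Int)
    (hx : x ∈ ((PySem.List.pyRange 0 (num.length : Int) 1).map (fun i =>
          (PySem.List.pyRange 0 ((num.headI).length : Int) 1).map (fun j =>
            pvCell num i j))).flatten) :
    ∃ i j : Nat, i < num.length ∧ j < (num.headI).length ∧ x = pvCell num (i : Int) (j : Int) := by
  rw [List.mem_flatten] at hx
  obtain ⟨l, hl, hxl⟩ := hx
  rw [List.mem_map] at hl
  obtain ⟨i, hi, rfl⟩ := hl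
  rw [List.mem_map] at hxl
  obtain ⟨j, hj, rfl⟩ := hxl
  rw [PySem.List.mem_pyRange_one] at hi hj
  refine ⟨i.toNat, j.toNat, by omega, by omega, ?_⟩
  rw [Int.toNat_of_nonneg hi.1, Int.toNat_of_nonneg hj.1]

theorem pvCells_mem (num : List (List Int)) (i j : Nat) (hi : i < num.length)
    (hj : j < (num.headI).length) :
    pvCell num (i : Int) (j : Int) ∈ ((PySem.List.pyRange 0 (num.length : Int) 1).map (fun i =>
          (PySem.List.pyRange 0 ((num.headI).length : Int) 1).map (fun j =>
            pvCell num i j))).flatten := by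
  rw [List.mem_flatten]
  refine ⟨(PySem.List.pyRange 0 ((num.headI).length : Int) 1).map (fun j => pvCell num (i:Int) j),
    List.mem_map_of_mem (by rw [PySem.List.mem_pyRange_one]; constructor <;> omega), ?_⟩
  exact List.mem_map_of_mem (by rw [PySem.List.mem_pyRange_one]; constructor <;> omega)

-- the ev = 1 branch: A's running min over all cells equals B's min of row minima
theorem pvBranch1 (num : List (List Int)) (hne : num ≠ [])
    (hm1 : 1 ≤ (num.headI).length)
    (hrows : ∀ row ∈ num, (num.headI).length ≤ row.length) :
    getminSum num 1 = getminSum_alt num 1 := by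
  unfold getminSum
  rw [if_pos rfl]
  have hn : 0 < num.length := List.length_pos_iff.mpr hne
  set m := (num.headI).length with hmdef
  set cells := ((PySem.List.pyRange 0 (num.length : Int) 1).map (fun i =>
          (PySem.List.pyRange 0 ((num.headI).length : Int) 1).map (fun j =>
            pvCell num i j))).flatten with hcells
  set rowmins := num.map (fun row =>
      (PySem.List.min? (row.take m) (fun x => x)).getD 0) with hrm
  have hBdef : getminSum_alt num 1
      = (PySem.List.min? rowmins (fun x => x)).getD 0 := by
    simp only [getminSum_alt, pvHead, PySem.List.slice_to_natCast, hrm, hmdef]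
    simp
  have hAdef : pvGetMin num = cells.foldl min (pvCell num 0 0) := pvGetMin_eq_foldl num
  -- per-row minima
  have hrowmin : ∀ row ∈ num, ∃ rm, PySem.List.min? (row.take m) (fun x => x) = some rm ∧
      rm ∈ row.take m ∧ ∀ y ∈ row.take m, rm ≤ y := by
    intro row hrow
    have hlen : m ≤ row.length := hrows row hrow
    have hne' : row.take m ≠ [] := by
      intro h
      have := congrArg List.length h
      simp only [List.length_take, List.length_nil] at this
      omega
    cases h : PySem.List.min? (row.take m) (fun x => x) with
    | none => exact absurd ((PySem.List.min?_eq_none_iff _ _).mp h) hne'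
    | some rm =>
        exact ⟨rm, rfl, PySem.List.min?_mem h, fun y hy => PySem.List.min?_isMin h y hy⟩
  -- the overall B value
  have hrne : rowmins ≠ [] := by simp [hrm, hne]
  obtain ⟨Bv, hBv⟩ : ∃ Bv, PySem.List.min? rowmins (fun x => x) = some Bv := by
    cases h : PySem.List.min? rowmins (fun x => x) with
    | none => exact absurd ((PySem.List.min?_eq_none_iff _ _).mp h) hrne
    | some v => exact ⟨v, rfl⟩
  rw [hAdef, hBdef, hBv, Option.getD_some]
  -- every A-candidate is a cell num[i][j], i < n, j < m
  have hAv : ∃ i j : Nat, ∃ (hi : i < num.length) (hj : j < m),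
      cells.foldl min (pvCell num 0 0) = (num[i]'hi)[j]'(by
        have := hrows _ (List.getElem_mem hi); omega) := by
    have hcases := PySem.List.foldl_min_mem cells (pvCell num 0 0)
    have hget : ∀ i j : Nat, (hi : i < num.length) → (hj : j < m) →
        pvCell num (i : Int) (j : Int) = (num[i]'hi)[j]'(by
          have := hrows _ (List.getElem_mem hi); omega) := by
      intro i j hi hj
      exact pvCell_getElem num i j hi _
    cases hcases with
    | inl h =>
        refine ⟨0, 0, hn, hm1, ?_⟩
        rw [h]
        have h0 := pvCell_getElem num 0 0 hn (by have := hrows _ (List.getElem_mem hn); omega)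
        simpa using h0
    | inr h =>
        obtain ⟨i, j, hi, hj, hx⟩ := pvMem_cells num _ h
        exact ⟨i, j, hi, hj, by rw [hx]; exact hget i j hi hj⟩
  apply le_antisymm
  · -- A's minimum is ≤ B's: B's value is some cell, and A folds min over all cells
    obtain ⟨row, hrow, hBveq⟩ := List.mem_map.mp (PySem.List.min?_mem hBv)
    obtain ⟨rm, hsome, hrmmem, _⟩ := hrowmin row hrow
    rw [← hBveq, hsome, Option.getD_some]
    obtain ⟨j, hjlt, hjeq⟩ := List.mem_iff_getElem.mp hrmmem
    have hjm : j < m := by simp only [List.length_take, lt_inf_iff] at hjlt; omega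
    have hjrow : j < row.length := by simp only [List.length_take, lt_inf_iff] at hjlt; omega
    obtain ⟨i, hilt, hieq⟩ := List.mem_iff_getElem.mp hrow
    have hcell : pvCell num (i : Int) (j : Int) = rm := by
      rw [pvCell_natCast]
      rw [show num.getD i [] = row by
        rw [List.getD_eq_getElem?_getD, List.getElem?_eq_getElem hilt]; simpa using hieq]
      rw [List.getD_eq_getElem?_getD, List.getElem?_eq_getElem hjrow]
      rw [List.getElem_take] at hjeq
      simpa using hjeq
    calc cells.foldl min (pvCell num 0 0)
        ≤ pvCell num (i : Int) (j : Int) :=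
          (PySem.List.foldl_min_le cells (pvCell num 0 0)).2 _ (pvCells_mem num i j hilt hjm)
      _ = rm := hcell
  · -- B's minimum is ≤ A's: A's value is some cell num[i][j], dominated by row i's minimum
    obtain ⟨i, j, hi, hj, hAveq⟩ := hAv
    rw [hAveq]
    have hrow : num[i]'hi ∈ num := List.getElem_mem hi
    obtain ⟨rm, hsome, hrmmem, hrmle⟩ := hrowmin _ hrow
    have h1 : Bv ≤ (PySem.List.min? ((num[i]'hi).take m) (fun x => x)).getD 0 :=
      PySem.List.min?_isMin hBv _ (List.mem_map_of_mem hrow)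
    rw [hsome, Option.getD_some] at h1
    have hjrow : j < (num[i]'hi).length := by have := hrows _ hrow; omega
    have h2 : rm ≤ (num[i]'hi)[j]'hjrow := by
      apply hrmle
      rw [List.mem_iff_getElem]
      refine ⟨j, by simp only [List.length_take, lt_inf_iff]; omega, ?_⟩
      exact List.getElem_take
    exact le_trans h1 h2

-- ===== VERDICT (by name: the statement is the Claim_ definition above) =====
theorem getminSum_spec : Claim_equal_getminSum := by
  intro num ev _ hpre
  obtain ⟨hne, h1, hone, hbig⟩ := hpre
  unfold Spec_getminSum
  by_cases hev : ev = 1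
  · subst hev
    exact pvBranch1 num hne (hone rfl).1 (hone rfl).2
  · exact pvBranch2 num ev h1 hev (hbig (by omega))
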